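-- pv_equiv track=rewrite | github.com/havocbane/adventofcode2017 | day4/day4.py | valid_passphrases
-- ===== SOURCE A (Python) =====
-- def valid_passphrases(data):
--     num_valid = 0
--     for line in data.split('\n'):
--         words = line.split()
--         if not words:
--             continue
--         if len(words) == len(set(words)):
--             num_valid += 1
--     return num_valid
-- ===== SOURCE B (Python) =====
-- def valid_passphrases(data):
--     num_valid = 0
--     for line in data.split('\n'):
--         words = sorted(line.split())
--         if words and all(words[i] != words[i + 1] for i in range(len(words) - 1)):
--             num_valid += 1
--     return num_valid
-- ===== Notes on version B (the rewrite author's own statement) =====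
-- stated objective: alternative
-- what changed: Replaces the per-line set construction and length comparison with sorting the words and checking that no two adjacent sorted words are equal.
import Mathlib
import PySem

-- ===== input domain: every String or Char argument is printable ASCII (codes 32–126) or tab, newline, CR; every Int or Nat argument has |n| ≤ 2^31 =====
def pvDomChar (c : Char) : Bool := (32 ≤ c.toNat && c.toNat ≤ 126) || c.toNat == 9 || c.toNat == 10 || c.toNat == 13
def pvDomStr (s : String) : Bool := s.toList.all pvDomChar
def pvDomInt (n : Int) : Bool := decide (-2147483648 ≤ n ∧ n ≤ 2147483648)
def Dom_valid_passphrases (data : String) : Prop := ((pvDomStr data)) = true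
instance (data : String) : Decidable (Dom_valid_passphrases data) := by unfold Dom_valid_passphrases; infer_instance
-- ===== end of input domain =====

-- B replaces A's per-line set-size uniqueness test with sort-then-adjacent-comparison (alternative algorithm, same result).

-- ===== PORT A =====
def valid_passphrases (data : String) : Int :=
  ((PySem.Str.split? data "\n").getD []).foldl (fun num_valid line =>
    let words := PySem.Str.split₀ line
    if words = [] then num_valid
    else if words.length = (PySem.Set.ofList words).length then num_valid + 1
    else num_valid) 0

-- ===== PORT B =====
def valid_passphrases_alt (data : String) : Int :=
  ((PySem.Str.split? data "\n").getD []).foldl (fun num_valid line =>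
    let words := PySem.List.sorted (PySem.Str.split₀ line) (fun w => w) false
    if words ≠ [] ∧ (List.range (words.length - 1)).all
        (fun i => words.getD i "" != words.getD (i + 1) "") then num_valid + 1
    else num_valid) 0

-- ===== PRECONDITION & SPEC =====
def Spec_valid_passphrases (data : String) (out : Int) : Prop := out = valid_passphrases_alt data
instance (data : String) (out : Int) : Decidable (Spec_valid_passphrases data out) := by unfold Spec_valid_passphrases; infer_instance

-- ===== CLAIM (what is proved, stated in full; the proofs are below) =====
def Claim_equal_valid_passphrases : Prop := ∀ (data : String), Dom_valid_passphrases data → Spec_valid_passphrases data (valid_passphrases data)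

-- ===== LEMMAS AND PROOFS =====

-- len(set(ws)) == len(ws) iff ws has no duplicates
theorem length_ofList_eq_iff_nodup (ws : List String) :
    (PySem.Set.ofList ws).length = ws.length ↔ ws.Nodup := by
  constructor
  · intro h
    have hperm : (PySem.Set.ofList ws).Perm ws.dedup := by
      rw [List.perm_ext_iff_of_nodup (PySem.Set.nodup_ofList ws) ws.nodup_dedup]
      intro x; rw [PySem.Set.mem_ofList, List.mem_dedup]
    have hlen : ws.dedup.length = ws.length := by rw [← hperm.length_eq, h]
    have hsub : ws.dedup.Sublist ws := ws.dedup_sublist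
    have : ws.dedup = ws := hsub.eq_of_length hlen
    rw [← this]; exact ws.nodup_dedup
  · intro h; exact congrArg List.length (PySem.Set.ofList_eq_self_of_nodup ws h)

theorem isChain_lt_of_le_ne {α : Type} [LinearOrder α] (l : List α)
    (hle : l.IsChain (· ≤ ·)) (hne : l.IsChain (· ≠ ·)) : l.IsChain (· < ·) := by
  induction l with
  | nil => exact List.isChain_nil
  | cons a t ih =>
    cases t with
    | nil => simp
    | cons b t' =>
      rw [List.isChain_cons_cons] at hle hne ⊢
      exact ⟨lt_of_le_of_ne hle.1 hne.1, ih hle.2 hne.2⟩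

-- no-duplicates iff adjacent elements of the (≤)-sorted list differ
theorem nodup_iff_chain'_ne (ws : List String) :
    ws.Nodup ↔ (PySem.List.sorted ws (fun w => w) false).IsChain (· ≠ ·) := by
  have hperm := PySem.List.sorted_perm ws (fun w => w) false
  have hpw : (PySem.List.sorted ws (fun w => w) false).Pairwise (· ≤ ·) :=
    PySem.List.sorted_pairwise ws (fun w => w)
  constructor
  · intro h
    exact ((hperm.nodup_iff.mpr h).imp (fun hab => hab)).isChain
  · intro h
    refine hperm.nodup_iff.mp ?_
    exact List.Pairwise.imp ne_of_lt
      ((List.isChain_iff_pairwise).mp (isChain_lt_of_le_ne _ hpw.isChain h))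

-- B's index-based all-test is the IsChain (· ≠ ·) predicate
theorem all_range_eq_chain' (l : List String) :
    ((List.range (l.length - 1)).all
      (fun i => l.getD i "" != l.getD (i + 1) "")) = true ↔ l.IsChain (· ≠ ·) := by
  rw [List.all_eq_true, List.isChain_iff_getElem]
  constructor
  · intro h i hi
    have := h i (List.mem_range.mpr (by omega))
    rw [bne_iff_ne, List.getD_eq_getElem l "" (by omega),
        List.getD_eq_getElem l "" hi] at this
    exact this
  · intro h i hi
    rw [List.mem_range] at hi
    rw [bne_iff_ne, List.getD_eq_getElem l "" (by omega),
        List.getD_eq_getElem l "" (by omega)]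
    exact h i (by omega)

theorem step_eq (num_valid : Int) (line : String) :
    (let words := PySem.Str.split₀ line
     if words = [] then num_valid
     else if words.length = (PySem.Set.ofList words).length then num_valid + 1
     else num_valid) =
    (let words := PySem.List.sorted (PySem.Str.split₀ line) (fun w => w) false
     if words ≠ [] ∧ (List.range (words.length - 1)).all
         (fun i => words.getD i "" != words.getD (i + 1) "") then num_valid + 1
     else num_valid) := by
  simp only
  set ws := PySem.Str.split₀ line with hws
  by_cases hnil : ws = []
  · rw [if_pos hnil]
    rw [if_neg]
    rintro ⟨hne, -⟩
    exact hne (by rw [PySem.List.sorted_eq_nil_iff]; exact hnil)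
  · rw [if_neg hnil]
    by_cases hlen : ws.length = (PySem.Set.ofList ws).length
    · rw [if_pos hlen, if_pos]
      refine ⟨by rw [Ne, PySem.List.sorted_eq_nil_iff]; exact hnil, ?_⟩
      rw [all_range_eq_chain']
      exact (nodup_iff_chain'_ne ws).mp ((length_ofList_eq_iff_nodup ws).mp hlen.symm)
    · rw [if_neg hlen, if_neg]
      rintro ⟨-, hall⟩
      exact hlen (((length_ofList_eq_iff_nodup ws).mpr
        ((nodup_iff_chain'_ne ws).mpr ((all_range_eq_chain' _).mp hall))).symm)

-- ===== VERDICT (by name: the statement is the Claim_ definition above) =====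
theorem valid_passphrases_spec : Claim_equal_valid_passphrases := by
  intro data _
  unfold Spec_valid_passphrases valid_passphrases valid_passphrases_alt
  congr 1
  funext num_valid line
  exact step_eq num_valid line
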